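-- pv_equiv track=rewrite | github.com/adum/puzzlebench | puzzles/modulo/modulo_core.py | parse_piece
-- ===== SOURCE A (Python) =====
-- from typing import Iterable
--
-- Coord = tuple[int, int]
--
-- Piece = tuple[Coord, ...]
--
-- def normalize_piece(coords: Iterable[Coord]) -> Piece:
--     coords_list = list(coords)
--     if not coords_list:
--         raise ValueError("Piece has no squares.")
--     min_x = min(x for x, _ in coords_list)
--     min_y = min(y for _, y in coords_list)
--     normalized = sorted((x - min_x, y - min_y) for x, y in coords_list)
--     return tuple(normalized)
--
-- def parse_piece(piece_raw: str) -> Piece: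
--     x = 0
--     y = 0
--     coords: list[Coord] = []
--     for ch in piece_raw.strip():
--         if ch == ",":
--             x = 0
--             y += 1
--             continue
--         if ch in ("X", "x"):
--             coords.append((x, y))
--         elif ch == ".":
--             pass
--         elif ch.isspace():
--             continue
--         else:
--             raise ValueError(f"Invalid piece character: {ch!r}")
--         x += 1
--     return normalize_piece(coords)
-- ===== SOURCE B (Python) =====
-- from typing import Iterable
--
-- Coord = tuple[int, int]
--
-- Piece = tuple[Coord, ...]
--
--
-- def parse_piece(piece_raw: str) -> Piece:
--     coords: list[Coord] = []
--     for y, row in enumerate(piece_raw.strip().split(",")):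
--         cells = [c for c in row if not c.isspace()]
--         for c in cells:
--             if c not in "Xx.":
--                 raise ValueError(f"Invalid piece character: {c!r}")
--         coords.extend((x, y) for x, c in enumerate(cells) if c in "Xx")
--     if not coords:
--         raise ValueError("Piece has no squares.")
--     coords.sort()
--     min_x = coords[0][0]
--     min_y = min(y for _, y in coords)
--     return tuple((x - min_x, y - min_y) for x, y in coords)
-- ===== Notes on version B (the rewrite author's own statement) =====
-- stated objective: alternative
-- what changed: Replaces A's flat single-pass state machine with x/y registers and its subtract-then-sort normalize helper by a staged pipeline: split on ',', filter whitespace out of each row, read coordinates off enumerate() of the filtered cells, then sort the raw coordinates first and subtract the minima afterwards (min_x read off the head of the sorted list), which is correct because subtracting a constant per component preserves lexicographic order.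
import Mathlib
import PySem

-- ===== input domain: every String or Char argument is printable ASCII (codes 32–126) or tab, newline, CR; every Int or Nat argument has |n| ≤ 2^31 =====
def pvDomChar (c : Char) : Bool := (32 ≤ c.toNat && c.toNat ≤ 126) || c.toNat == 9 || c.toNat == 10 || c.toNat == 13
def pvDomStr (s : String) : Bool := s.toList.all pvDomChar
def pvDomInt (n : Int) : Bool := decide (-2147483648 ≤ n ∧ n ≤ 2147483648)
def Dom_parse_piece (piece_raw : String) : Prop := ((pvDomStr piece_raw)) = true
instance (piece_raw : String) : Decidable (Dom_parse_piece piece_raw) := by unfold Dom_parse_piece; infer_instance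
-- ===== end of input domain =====

-- B replaces A's flat single-pass state machine (and its subtract-then-sort normalize helper) by a
-- staged pipeline: split on ',', filter whitespace per row, read coords off enumerate of the cells,
-- sort the raw coords and subtract the minima afterwards (alternative decomposition, not faster).

-- ===== PORT A =====
-- normalize_piece as used by A; Python raises ValueError on empty coords (excluded by Pre_), the port returns [] there
def pvNormA (coords : List (Int × Int)) : List (Int × Int) :=
  if coords = [] then []
  else
    let min_x := (PySem.List.min? (coords.map Prod.fst) (fun v => v)).getD 0
    let min_y := (PySem.List.min? (coords.map Prod.snd) (fun v => v)).getD 0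
    PySem.List.sorted2 (coords.map (fun p => (p.1 - min_x, p.2 - min_y))) Prod.fst Prod.snd

-- one step of A's loop; `none` is the raised ValueError, propagated
def pvStepA (st : Option (Int × Int × List (Int × Int))) (ch : Char) :
    Option (Int × Int × List (Int × Int)) :=
  match st with
  | none => none
  | some (x, y, coords) =>
    if ch = ',' then some (0, y + 1, coords)
    else if ch = 'X' ∨ ch = 'x' then some (x + 1, y, coords ++ [(x, y)])
    else if ch = '.' then some (x + 1, y, coords)
    else if PySem.Chars.isspace ch then some (x, y, coords)
    else none

def parse_piece (piece_raw : String) : List (Int × Int) :=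
  match (PySem.Str.strip piece_raw).toList.foldl pvStepA (some (0, 0, [])) with
  | none => []
  | some (_, _, coords) => pvNormA coords

-- ===== PORT B =====
-- one row of B: whitespace filtered out, validity checked, coords read off enumerate of the cells;
-- `none` is the raised ValueError
def pvRowCoords (y : Int) (row : List Char) : Option (List (Int × Int)) :=
  let cells := row.filter (fun c => !PySem.Chars.isspace c)
  if cells.all (fun c => c == 'X' || c == 'x' || c == '.') then
    some ((PySem.List.enumerate cells).filterMap
      (fun p => if p.2 == 'X' || p.2 == 'x' then some (p.1, y) else none))
  else none

def parse_piece_alt (piece_raw : String) : List (Int × Int) :=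
  match (PySem.List.enumerate
      (PySem.Chars.splitOn (PySem.Str.strip piece_raw).toList (String.toList ","))).foldl
      (fun acc yr =>
        match acc with
        | none => none
        | some cs => (pvRowCoords yr.1 yr.2).map (cs ++ ·))
      (some []) with
  | none => []
  | some coords =>
    -- Python raises "Piece has no squares." on empty coords (excluded by Pre_); the port returns []
    if coords = [] then []
    else
      let s := PySem.List.sorted2 coords Prod.fst Prod.snd
      let min_x := s.headI.1
      let min_y := (PySem.List.min? (s.map Prod.snd) (fun v => v)).getD 0
      s.map (fun p => (p.1 - min_x, p.2 - min_y))

-- ===== PRECONDITION & SPEC =====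
-- Pre_ excludes exactly the inputs on which Python A raises ValueError: a stripped string
-- containing a character other than ',', 'X', 'x', '.', whitespace, or containing no 'X'/'x' at all.
def Pre_parse_piece (piece_raw : String) : Prop :=
  ((PySem.Str.strip piece_raw).toList.all
      (fun c => c == ',' || c == 'X' || c == 'x' || c == '.' || PySem.Chars.isspace c)) = true ∧
  ((PySem.Str.strip piece_raw).toList.any (fun c => c == 'X' || c == 'x')) = true
instance (piece_raw : String) : Decidable (Pre_parse_piece piece_raw) := by
  unfold Pre_parse_piece; infer_instance

def pvWitness_parse_piece : String := "X. ,.x"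

def Spec_parse_piece (piece_raw : String) (out : List (Int × Int)) : Prop := out = parse_piece_alt piece_raw
instance (piece_raw : String) (out : List (Int × Int)) : Decidable (Spec_parse_piece piece_raw out) := by unfold Spec_parse_piece; infer_instance

-- ===== CLAIM (what is proved, stated in full; the proofs are below) =====
def Claim_equal_parse_piece : Prop := ∀ (piece_raw : String), Dom_parse_piece piece_raw → Pre_parse_piece piece_raw → Spec_parse_piece piece_raw (parse_piece piece_raw)

-- ===== LEMMAS AND PROOFS =====

-- splitOn [','] characterised structurally (proof-side helper)
def pvSplitc : List Char → List (List Char)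
  | [] => [[]]
  | c :: rest =>
    if c = ',' then [] :: pvSplitc rest
    else
      match pvSplitc rest with
      | [] => [[c]]
      | r :: rs => (c :: r) :: rs

theorem pvSplitc_ne_nil (l : List Char) : pvSplitc l ≠ [] := by
  induction l with
  | nil => simp [pvSplitc]
  | cons c rest ih =>
    simp only [pvSplitc]
    split_ifs
    · simp
    · cases h : pvSplitc rest <;> simp

theorem pvSplitOn_go_eq (fuel : Nat) (l cur : List Char) (acc : List (List Char))
    (h : l.length < fuel) :
    PySem.Chars.splitOn.go [','] fuel l cur acc =
      acc.reverse ++ (cur.reverse ++ (pvSplitc l).headI) :: (pvSplitc l).tail := by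
  induction l generalizing fuel cur acc with
  | nil =>
    cases fuel with
    | zero => omega
    | succ f => simp [PySem.Chars.splitOn.go, pvSplitc]
  | cons c rest ih =>
    cases fuel with
    | zero => omega
    | succ f =>
      by_cases hc : c = ','
      · subst hc
        rw [PySem.Chars.splitOn.go]
        simp only [List.isPrefixOf, List.length]
        rw [if_pos (by simp)]
        simp only [List.drop]
        rw [ih f [] ((cur.reverse) :: acc) (by simpa using Nat.lt_of_succ_lt_succ h)]
        cases hrest : pvSplitc rest with
        | nil => exact absurd hrest (pvSplitc_ne_nil rest)
        | cons r rs => simp [pvSplitc, hrest]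
      · rw [PySem.Chars.splitOn.go]
        rw [if_neg (by simp [List.isPrefixOf, Ne.symm hc])]
        rw [ih f (c :: cur) acc (by simpa using Nat.lt_of_succ_lt_succ h)]
        have hne := pvSplitc_ne_nil rest
        cases hrest : pvSplitc rest with
        | nil => exact absurd hrest hne
        | cons r rs => simp [pvSplitc, hc, hrest]

theorem pvSplitOn_eq (l : List Char) :
    PySem.Chars.splitOn l (String.toList ",") = pvSplitc l := by
  show PySem.Chars.splitOn.go [','] (l.length + 1) l [] [] = _
  rw [pvSplitOn_go_eq (l.length + 1) l [] [] (by omega)]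
  cases hrest : pvSplitc l with
  | nil => exact absurd hrest (pvSplitc_ne_nil l)
  | cons r rs => simp

theorem pvSplitc_no_comma (l : List Char) : ∀ r ∈ pvSplitc l, ',' ∉ r := by
  induction l with
  | nil => simp [pvSplitc]
  | cons c rest ih =>
    simp only [pvSplitc]
    split_ifs with hc
    · intro r hr
      rcases List.mem_cons.mp hr with h | h
      · simp [h]
      · exact ih r h
    · cases hrest : pvSplitc rest with
      | nil => exact absurd hrest (pvSplitc_ne_nil rest)
      | cons r rs =>
        intro t ht
        rcases List.mem_cons.mp ht with h | h
        · subst h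
          have := ih r (by simp [hrest])
          simp [Ne.symm hc, this]
        · exact ih t (by simp [hrest, h])

theorem pvSplitc_intercalate (l : List Char) :
    List.intercalate [','] (pvSplitc l) = l := by
  induction l with
  | nil => simp [pvSplitc, List.intercalate]
  | cons c rest ih =>
    simp only [pvSplitc]
    split_ifs with hc
    · subst hc
      cases hrest : pvSplitc rest with
      | nil => exact absurd hrest (pvSplitc_ne_nil rest)
      | cons r rs =>
        rw [hrest] at ih
        simp [List.intercalate] at ih ⊢
        simpa using ih
    · cases hrest : pvSplitc rest with
      | nil => exact absurd hrest (pvSplitc_ne_nil rest)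
      | cons r rs =>
        rw [hrest] at ih
        cases rs with
        | nil => simpa [List.intercalate] using ih
        | cons r' rs' =>
          simp [List.intercalate] at ih ⊢
          simpa using ih

theorem pvFoldA_none (l : List Char) : l.foldl pvStepA none = none := by
  induction l with
  | nil => rfl
  | cons c rest ih => simpa [pvStepA] using ih

-- row coordinates of A's loop, read off the whitespace-filtered cells (proof-side helper)
def pvRowAux (x y : Int) : List Char → List (Int × Int)
  | [] => []
  | c :: cs => (if c = 'X' ∨ c = 'x' then [(x, y)] else []) ++ pvRowAux (x + 1) y cs

theorem pvRowAux_enum (x y : Int) (cells : List Char) :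
    (PySem.List.enumerate cells x).filterMap
      (fun p => if p.2 == 'X' || p.2 == 'x' then some (p.1, y) else none) =
    pvRowAux x y cells := by
  induction cells generalizing x with
  | nil => rfl
  | cons c cs ih =>
    rw [PySem.List.enumerate_cons, List.filterMap_cons, ih (x + 1)]
    by_cases h : c = 'X' ∨ c = 'x'
    · have hb : (c == 'X' || c == 'x') = true := by
        rcases h with h | h <;> simp [h]
      simp [pvRowAux, hb, h]
    · have hb : (c == 'X' || c == 'x') = false := by
        have h1 : ¬ c = 'X' := fun hh => h (Or.inl hh)
        have h2 : ¬ c = 'x' := fun hh => h (Or.inr hh)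
        simp [h1, h2]
      simp [pvRowAux, hb, h]

-- A's loop over one comma-free row, characterised by the filtered cells
theorem pvRowA (r : List Char) (hr : ',' ∉ r) (x0 y : Int) (acc : List (Int × Int)) :
    r.foldl pvStepA (some (x0, y, acc)) =
      (if (r.filter (fun c => !PySem.Chars.isspace c)).all
            (fun c => c == 'X' || c == 'x' || c == '.') then
        some (x0 + ((r.filter (fun c => !PySem.Chars.isspace c)).length : Int), y,
          acc ++ pvRowAux x0 y (r.filter (fun c => !PySem.Chars.isspace c)))
      else none) := by
  induction r generalizing x0 acc with
  | nil => simp [pvRowAux]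
  | cons c cs ih =>
    have hc : c ≠ ',' := fun h => hr (by simp [h])
    have hcs : ',' ∉ cs := fun h => hr (List.mem_cons_of_mem _ h)
    by_cases hs : PySem.Chars.isspace c = true
    · have hX : ¬ (c = 'X' ∨ c = 'x') := by
        rintro (rfl | rfl) <;> simp [show PySem.Chars.isspace 'X' = false from by decide,
          show PySem.Chars.isspace 'x' = false from by decide] at hs
      have hd : c ≠ '.' := by
        rintro rfl; simp [show PySem.Chars.isspace '.' = false from by decide] at hs
      rw [List.foldl_cons,
        show pvStepA (some (x0, y, acc)) c = some (x0, y, acc) by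
          simp [pvStepA, hc, hX, hd, hs],
        ih hcs x0 acc]
      simp [List.filter_cons, hs]
    · rw [List.foldl_cons]
      rw [show (c :: cs).filter (fun c => !PySem.Chars.isspace c)
            = c :: cs.filter (fun c => !PySem.Chars.isspace c) by
          simp [List.filter_cons, hs]]
      by_cases hX : c = 'X' ∨ c = 'x'
      · have hb : (c == 'X' || c == 'x' || c == '.') = true := by
          rcases hX with h | h <;> simp [h]
        rw [show pvStepA (some (x0, y, acc)) c = some (x0 + 1, y, acc ++ [(x0, y)]) by
            simp [pvStepA, hc, hX],
          ih hcs (x0 + 1) (acc ++ [(x0, y)])]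
        simp only [List.all_cons, hb, Bool.true_and, pvRowAux, if_pos hX]
        split_ifs with hall
        · simp only [Option.some.injEq, Prod.mk.injEq, List.length_cons]
          refine ⟨by push_cast; ring, trivial, by simp⟩
        · rfl
      · by_cases hd : c = '.'
        · have hb : (c == 'X' || c == 'x' || c == '.') = true := by simp [hd]
          rw [show pvStepA (some (x0, y, acc)) c = some (x0 + 1, y, acc) by
              simp [pvStepA, hc, hX, hd],
            ih hcs (x0 + 1) acc]
          simp only [List.all_cons, hb, Bool.true_and, pvRowAux, if_neg hX]
          split_ifs with hall
          · simp only [Option.some.injEq, Prod.mk.injEq, List.length_cons]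
            refine ⟨by push_cast; ring, trivial, by simp⟩
          · rfl
        · have hb : (c == 'X' || c == 'x' || c == '.') = false := by
            have h1 : ¬ c = 'X' := fun hh => hX (Or.inl hh)
            have h2 : ¬ c = 'x' := fun hh => hX (Or.inr hh)
            simp [h1, h2, hd]
          rw [show pvStepA (some (x0, y, acc)) c = none by
              simp [pvStepA, hc, hX, hd, hs],
            pvFoldA_none]
          simp [hb]

theorem pvRowCoords_eq (y : Int) (r : List Char) :
    pvRowCoords y r =
      (if (r.filter (fun c => !PySem.Chars.isspace c)).all
            (fun c => c == 'X' || c == 'x' || c == '.') then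
        some (pvRowAux 0 y (r.filter (fun c => !PySem.Chars.isspace c)))
      else none) := by
  simp only [pvRowCoords, pvRowAux_enum]

theorem pvFoldB_none (rows : List (Int × List Char)) :
    rows.foldl
      (fun acc yr =>
        match acc with
        | none => none
        | some cs => (pvRowCoords yr.1 yr.2).map (cs ++ ·))
      none = none := by
  induction rows with
  | nil => rfl
  | cons r rs ih => simpa using ih

-- A's whole loop equals B's enumerate-rows fold
theorem pvMain (rows : List (List Char)) (h : ∀ r ∈ rows, ',' ∉ r) (y : Int)
    (acc : List (Int × Int)) :
    (List.foldl pvStepA (some (0, y, acc)) (List.intercalate [','] rows)).map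
        (fun s => s.2.2) =
      (PySem.List.enumerate rows y).foldl
        (fun acc yr =>
          match acc with
          | none => none
          | some cs => (pvRowCoords yr.1 yr.2).map (cs ++ ·))
        (some acc) := by
  induction rows generalizing y acc with
  | nil => rfl
  | cons r rs ih =>
    have hrc : ',' ∉ r := h r (by simp)
    have hrs : ∀ t ∈ rs, ',' ∉ t := fun t ht => h t (List.mem_cons_of_mem _ ht)
    rw [PySem.List.enumerate_cons, List.foldl_cons]
    cases rs with
    | nil =>
      rw [show List.intercalate [','] [r] = r by simp [List.intercalate],
        pvRowA r hrc 0 y acc, pvRowCoords_eq]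
      split_ifs with hall
      · simp
      · simp
    | cons r' rs' =>
      rw [show List.intercalate [','] (r :: r' :: rs') =
            r ++ ',' :: List.intercalate [','] (r' :: rs') by
          simp [List.intercalate, List.intersperse],
        List.foldl_append, pvRowA r hrc 0 y acc, pvRowCoords_eq]
      split_ifs with hall
      · rw [List.foldl_cons,
          show pvStepA (some (0 + ((r.filter (fun c => !PySem.Chars.isspace c)).length : Int), y,
              acc ++ pvRowAux 0 y (r.filter (fun c => !PySem.Chars.isspace c)))) ','
            = some (0, y + 1, acc ++ pvRowAux 0 y (r.filter (fun c => !PySem.Chars.isspace c))) by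
            simp [pvStepA],
          ih hrs (y + 1) _]
        simp
      · rw [List.foldl_cons,
          show pvStepA none ',' = none from rfl, pvFoldA_none]
        simp [pvFoldB_none]

-- the Bool insertion order used by sorted2 .. fst snd is the lexicographic order on the pair
theorem pvLt_eq :
    (fun (a b : Int × Int) =>
        (decide (Prod.fst a < Prod.fst b) ||
          (!decide (Prod.fst b < Prod.fst a) && decide (Prod.snd a < Prod.snd b)))) =
      fun a b => decide (toLex a < toLex b) := by
  funext a b
  rcases lt_trichotomy a.1 b.1 with h | h | h
  · simp [h, Prod.Lex.lt_iff, not_lt.mpr (le_of_lt h)]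
  · simp [h, Prod.Lex.lt_iff]
  · simp [h, Prod.Lex.lt_iff, not_lt.mpr (le_of_lt h), ne_of_gt h]

theorem pvFoldl_insertBy_pairwise {α κ : Type} [LinearOrder κ] (key : α → κ)
    (xs acc : List α) (h : acc.Pairwise (fun a b => key a ≤ key b)) :
    (List.foldl (fun acc x => PySem.List.insertBy (fun a b => decide (key a < key b)) x acc)
        acc xs).Pairwise (fun a b => key a ≤ key b) := by
  induction xs generalizing acc with
  | nil => exact h
  | cons x xs ih =>
    exact ih _ (PySem.List.insertBy_pairwise_le key x acc h)

theorem pvSorted2_pairwise (xs : List (Int × Int)) :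
    (PySem.List.sorted2 xs Prod.fst Prod.snd).Pairwise
      (fun a b => toLex a ≤ toLex b) := by
  show (List.foldl (fun acc x => PySem.List.insertBy
      (fun (a b : Int × Int) =>
        (decide (Prod.fst a < Prod.fst b) ||
          (!decide (Prod.fst b < Prod.fst a) && decide (Prod.snd a < Prod.snd b)))) x acc)
      [] xs).Pairwise (fun a b => toLex a ≤ toLex b)
  rw [pvLt_eq]
  exact pvFoldl_insertBy_pairwise (fun p => toLex p) xs [] (by simp)

theorem pvHead_min (c : List (Int × Int)) (hc : c ≠ []) :
    (PySem.List.min? (c.map Prod.fst) (fun v => v)).getD 0 =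
      (PySem.List.sorted2 c Prod.fst Prod.snd).headI.1 := by
  have hperm : (PySem.List.sorted2 c Prod.fst Prod.snd).Perm c :=
    PySem.List.sorted2_perm c Prod.fst Prod.snd false
  have hsne : PySem.List.sorted2 c Prod.fst Prod.snd ≠ [] := by
    intro hnil
    exact hc (List.Perm.nil_eq (hnil ▸ hperm)).symm
  obtain ⟨hd, tl, hs⟩ := List.exists_cons_of_ne_nil hsne
  have hmape : c.map Prod.fst ≠ [] := by simpa using hc
  obtain ⟨m, hm⟩ : ∃ m, PySem.List.min? (c.map Prod.fst) (fun v => v) = some m := by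
    cases hmin : PySem.List.min? (c.map Prod.fst) (fun v => v) with
    | none => exact absurd ((PySem.List.min?_eq_none_iff _ _).mp hmin) hmape
    | some m => exact ⟨m, rfl⟩
  have hmem : m ∈ c.map Prod.fst := PySem.List.min?_mem hm
  obtain ⟨q, hq, hqm⟩ := List.mem_map.mp hmem
  have hpw := pvSorted2_pairwise c
  rw [hs] at hpw
  have hhd_le : ∀ b ∈ tl, hd.1 ≤ b.1 := by
    intro b hb
    have := (List.pairwise_cons.mp hpw).1 b hb
    rcases Prod.Lex.le_iff.mp this with h | h
    · exact le_of_lt h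
    · exact le_of_eq h.1
  have hq_s : q ∈ hd :: tl := hs ▸ hperm.symm.subset hq
  have h1 : hd.1 ≤ m := by
    rcases List.mem_cons.mp hq_s with h | h
    · rw [← hqm, h]
    · rw [← hqm]; exact hhd_le q h
  have h2 : m ≤ hd.1 := by
    have : hd.1 ∈ c.map Prod.fst := by
      exact List.mem_map.mpr ⟨hd, hperm.subset (by simp [hs]), rfl⟩
    exact PySem.List.min?_isMin hm hd.1 this
  rw [hm]
  simp [hs, le_antisymm h1 h2]

theorem pvMinSnd_perm (c : List (Int × Int)) (hc : c ≠ []) :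
    (PySem.List.min? (c.map Prod.snd) (fun v => v)).getD 0 =
      (PySem.List.min? ((PySem.List.sorted2 c Prod.fst Prod.snd).map Prod.snd)
        (fun v => v)).getD 0 := by
  have hperm : ((PySem.List.sorted2 c Prod.fst Prod.snd).map Prod.snd).Perm (c.map Prod.snd) :=
    (PySem.List.sorted2_perm c Prod.fst Prod.snd false).map Prod.snd
  have h1 : c.map Prod.snd ≠ [] := by simpa using hc
  have h2 : (PySem.List.sorted2 c Prod.fst Prod.snd).map Prod.snd ≠ [] := by
    intro h; exact h1 (List.Perm.nil_eq (h ▸ hperm)).symm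
  obtain ⟨m1, hm1⟩ : ∃ m, PySem.List.min? (c.map Prod.snd) (fun v => v) = some m := by
    cases hmin : PySem.List.min? (c.map Prod.snd) (fun v => v) with
    | none => exact absurd ((PySem.List.min?_eq_none_iff _ _).mp hmin) h1
    | some m => exact ⟨m, rfl⟩
  obtain ⟨m2, hm2⟩ : ∃ m, PySem.List.min? ((PySem.List.sorted2 c Prod.fst Prod.snd).map Prod.snd)
      (fun v => v) = some m := by
    cases hmin : PySem.List.min? ((PySem.List.sorted2 c Prod.fst Prod.snd).map Prod.snd)
        (fun v => v) with
    | none => exact absurd ((PySem.List.min?_eq_none_iff _ _).mp hmin) h2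
    | some m => exact ⟨m, rfl⟩
  rw [hm1, hm2]
  have e1 : m1 ∈ (PySem.List.sorted2 c Prod.fst Prod.snd).map Prod.snd :=
    hperm.symm.subset (PySem.List.min?_mem hm1)
  have e2 : m2 ∈ c.map Prod.snd := hperm.subset (PySem.List.min?_mem hm2)
  have : m1 = m2 := le_antisymm (PySem.List.min?_isMin hm1 m2 e2)
    (PySem.List.min?_isMin hm2 m1 e1)
  rw [this]

theorem pvShift_mono (dx dy : Int) {a b : Int × Int} (h : toLex a ≤ toLex b) :
    toLex ((a.1 - dx, a.2 - dy) : Int × Int) ≤ toLex ((b.1 - dx, b.2 - dy) : Int × Int) := by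
  simp only [Prod.Lex.le_iff, ofLex_toLex] at h ⊢
  rcases h with h | h
  · exact Or.inl (by simp; omega)
  · exact Or.inr ⟨by simp [h.1], by simp; omega⟩

theorem pvSorted2_map_shift (dx dy : Int) (c : List (Int × Int)) :
    PySem.List.sorted2 (c.map (fun p => (p.1 - dx, p.2 - dy))) Prod.fst Prod.snd =
      (PySem.List.sorted2 c Prod.fst Prod.snd).map (fun p => (p.1 - dx, p.2 - dy)) := by
  apply PySem.List.eq_of_perm_of_pairwise_le_of_injective (fun p : Int × Int => toLex p)
    toLex.injective
  · exact (PySem.List.sorted2_perm _ _ _ _).trans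
      (((PySem.List.sorted2_perm c Prod.fst Prod.snd false).map _).symm)
  · exact pvSorted2_pairwise _
  · exact List.Pairwise.map _ (fun a b h => pvShift_mono dx dy h) (pvSorted2_pairwise c)

theorem pvNorm_eq (c : List (Int × Int)) :
    pvNormA c =
      (if c = [] then []
       else
        let s := PySem.List.sorted2 c Prod.fst Prod.snd
        let min_x := s.headI.1
        let min_y := (PySem.List.min? (s.map Prod.snd) (fun v => v)).getD 0
        s.map (fun p => (p.1 - min_x, p.2 - min_y))) := by
  unfold pvNormA
  by_cases hc : c = []
  · simp [hc]
  · simp only [if_neg hc]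
    rw [← pvHead_min c hc, ← pvMinSnd_perm c hc, pvSorted2_map_shift]

-- ===== VERDICT (by name: the statement is the Claim_ definition above) =====
theorem parse_piece_spec : Claim_equal_parse_piece := by
  intro s _ _
  unfold Spec_parse_piece parse_piece parse_piece_alt
  rw [pvSplitOn_eq]
  have h := pvMain (pvSplitc (PySem.Str.strip s).toList)
      (pvSplitc_no_comma _) 0 []
  rw [pvSplitc_intercalate] at h
  cases hA : List.foldl pvStepA (some (0, 0, [])) (PySem.Str.strip s).toList with
  | none =>
    rw [hA] at h
    simp only [Option.map_none] at h
    rw [← h]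
  | some st =>
    obtain ⟨a, b, c⟩ := st
    rw [hA] at h
    simp only [Option.map_some] at h
    rw [← h]
    exact pvNorm_eq c
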